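-- pv_equiv track=rewrite | github.com/SagarDhok/CodeDaily | GeeksOfGeeks/day-83.py | min_value_to_balance
-- ===== SOURCE A (Python) =====
-- def min_value_to_balance(arr):
--     ln = 0
--     for i in arr:
--         ln +=1
--     mid = ln//2
--
--
--     left =  arr[:mid]
--     right = arr[mid:]
--
--     left_sum = 0
--     for i in left:
--       left_sum+=i
--
--
--     right_sum = 0
--     for j in right:
--       right_sum+=j
--
--
--     if left_sum>right_sum:
--      return left_sum-right_sum
--     else:
--       return right_sum-left_sum
-- ===== SOURCE B (Python) =====
-- def min_value_to_balance(arr):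
--     # Two pointers moving inward from both ends: each step charges one element
--     # to the left accumulator and one to the right accumulator; an odd middle
--     # element goes to the right (as the split-at-mid convention puts it).
--     left = right = 0
--     i, j = 0, len(arr) - 1
--     while i < j:
--         left += arr[i]
--         right += arr[j]
--         i += 1
--         j -= 1
--     if i == j:
--         right += arr[i]
--     return abs(left - right)
-- ===== Notes on version B (the rewrite author's own statement) =====
-- stated objective: alternative
-- what changed: B never computes a midpoint split: it walks two pointers inward from both ends, charging one element per step to a left and a right accumulator (an odd middle element to the right), and returns abs(left-right); A counts the length with a loop, slices the array into two halves at len//2, sums each half in its own loop and branches on the comparison.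
import Mathlib
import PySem

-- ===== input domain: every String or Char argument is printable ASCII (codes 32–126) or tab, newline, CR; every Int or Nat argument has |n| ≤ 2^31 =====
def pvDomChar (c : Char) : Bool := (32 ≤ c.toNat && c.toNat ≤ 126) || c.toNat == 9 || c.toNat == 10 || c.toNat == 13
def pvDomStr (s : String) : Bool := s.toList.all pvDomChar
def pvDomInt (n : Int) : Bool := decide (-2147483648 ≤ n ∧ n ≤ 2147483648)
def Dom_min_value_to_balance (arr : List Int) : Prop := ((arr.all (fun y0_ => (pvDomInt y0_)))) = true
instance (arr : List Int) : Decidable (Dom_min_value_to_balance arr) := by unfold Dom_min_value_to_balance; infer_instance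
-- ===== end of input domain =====

-- B replaces A's length loop + midpoint slices + two half-sum loops + comparison branch by a
-- two-pointer inward sweep with a left and a right accumulator (objective: alternative).

-- ===== PORT A =====
def min_value_to_balance (arr : List Int) : Int :=
  let ln : Int := arr.foldl (fun a _ => a + 1) 0
  let mid : Int := PySem.Int.floordiv ln 2
  let left := PySem.List.slice arr none (some mid)
  let right := PySem.List.slice arr (some mid) none
  let left_sum := left.foldl (fun a i => a + i) 0
  let right_sum := right.foldl (fun a j => a + j) 0
  if left_sum > right_sum then left_sum - right_sum else right_sum - left_sum

-- ===== PORT B =====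
-- the while i < j loop of Source B; arr[i]/arr[j] are always in range there, so
-- pyGet? is some and the .getD 0 default is never taken
def pvGoB (arr : List Int) (i j left right : Int) : Int :=
  if i < j then
    pvGoB arr (i + 1) (j - 1)
      (left + (PySem.List.pyGet? arr i).getD 0)
      (right + (PySem.List.pyGet? arr j).getD 0)
  else if i = j then |left - (right + (PySem.List.pyGet? arr i).getD 0)|
  else |left - right|
termination_by (j - i + 1).toNat
decreasing_by omega

def min_value_to_balance_alt (arr : List Int) : Int :=
  pvGoB arr 0 ((arr.length : Int) - 1) 0 0

-- ===== PRECONDITION & SPEC =====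
def Spec_min_value_to_balance (arr : List Int) (out : Int) : Prop := out = min_value_to_balance_alt arr
instance (arr : List Int) (out : Int) : Decidable (Spec_min_value_to_balance arr out) := by unfold Spec_min_value_to_balance; infer_instance

-- ===== CLAIM =====
def Claim_equal_min_value_to_balance : Prop := ∀ (arr : List Int), Dom_min_value_to_balance arr → Spec_min_value_to_balance arr (min_value_to_balance arr)

-- ===== LEMMAS AND PROOFS =====

theorem pv_count_foldl (arr : List Int) (a : Int) :
    arr.foldl (fun a _ => a + 1) a = a + arr.length := by
  induction arr generalizing a with
  | nil => simp
  | cons x xs ih => simp [List.foldl, ih]; omega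

theorem pv_sum_foldl (arr : List Int) (a : Int) :
    arr.foldl (fun a i => a + i) a = a + arr.sum := by
  induction arr generalizing a with
  | nil => simp
  | cons x xs ih => simp [List.foldl, ih]; ring

-- loop invariant of the inward sweep: with j = n-1-k it computes
-- |(left + sum of arr[k:n/2]) - (right + sum of arr[n/2:n-k])|
theorem pvGoB_spec (arr : List Int) : ∀ (m k : Nat), arr.length / 2 - k = m →
    k ≤ arr.length / 2 → ∀ (left right : Int),
    pvGoB arr (k : Int) ((arr.length : Int) - 1 - k) left right
      = |(left + ((arr.drop k).take (arr.length / 2 - k)).sum)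
          - (right + ((arr.take (arr.length - k)).drop (arr.length / 2)).sum)| := by
  intro m
  induction m with
  | zero =>
    intro k hm hk left right
    have hk2 : k = arr.length / 2 := by omega
    subst hk2
    rw [pvGoB]
    by_cases hev : 2 * (arr.length / 2) = arr.length
    · -- even length: pointers crossed, both remaining slices empty
      have h1 : ¬ ((arr.length / 2 : Nat) : Int) < (arr.length : Int) - 1 - (arr.length / 2 : Nat) := by
        push_cast; omega
      have h2 : ¬ ((arr.length / 2 : Nat) : Int) = (arr.length : Int) - 1 - (arr.length / 2 : Nat) := by
        push_cast; omega
      rw [if_neg h1, if_neg h2]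
      have h3 : arr.length - arr.length / 2 = arr.length / 2 := by omega
      simp [h3]
    · -- odd length: i = j, the middle element goes to the right accumulator
      have hodd : 2 * (arr.length / 2) + 1 = arr.length := by omega
      have hmidlt : arr.length / 2 < arr.length := by omega
      have h1 : ¬ ((arr.length / 2 : Nat) : Int) < (arr.length : Int) - 1 - (arr.length / 2 : Nat) := by
        push_cast; omega
      have h2 : ((arr.length / 2 : Nat) : Int) = (arr.length : Int) - 1 - (arr.length / 2 : Nat) := by
        push_cast; omega
      rw [if_neg h1, if_pos h2]
      have h3 : arr.length - arr.length / 2 = arr.length / 2 + 1 := by omega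
      have h4 : arr.take (arr.length / 2 + 1)
          = arr.take (arr.length / 2) ++ [arr[arr.length / 2]] := by
        rw [List.take_add_one]
        simp [List.getElem?_eq_getElem hmidlt]
      have h5 : (arr.take (arr.length / 2 + 1)).drop (arr.length / 2) = [arr[arr.length / 2]] := by
        rw [h4]
        exact List.drop_left' (by simp [Nat.min_eq_left (le_of_lt hmidlt)])
      have hpg : PySem.List.pyGet? arr ((arr.length / 2 : Nat) : Int)
          = some arr[arr.length / 2] := by
        rw [PySem.List.pyGet?_natCast]
        exact List.getElem?_eq_getElem hmidlt
      rw [hpg, h3, h5]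
      simp
  | succ m ih =>
    intro k hm hk left right
    have hklt : k < arr.length / 2 := by omega
    have hkn : k < arr.length := by omega
    have hjn : arr.length - 1 - k < arr.length := by omega
    rw [pvGoB]
    have h1 : ((k : Nat) : Int) < (arr.length : Int) - 1 - (k : Nat) := by
      push_cast; omega
    rw [if_pos h1]
    have hcast1 : ((k : Nat) : Int) + 1 = (((k + 1 : Nat)) : Int) := by push_cast; ring
    have hcast2 : (arr.length : Int) - 1 - (k : Nat) - 1 = (arr.length : Int) - 1 - ((k + 1 : Nat) : Int) := by
      push_cast; ring
    have hcast3 : (arr.length : Int) - 1 - (k : Nat) = (((arr.length - 1 - k : Nat)) : Int) := by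
      push_cast; omega
    rw [hcast1, hcast2, ih (k + 1) (by omega) (by omega)]
    -- left slice: arr[k:mid] = arr[k] :: arr[k+1:mid]
    have hdropk : arr.drop k = arr[k] :: arr.drop (k + 1) := List.drop_eq_getElem_cons hkn
    have htl : ((arr.drop k).take (arr.length / 2 - k)).sum
        = arr[k] + ((arr.drop (k + 1)).take (arr.length / 2 - (k + 1))).sum := by
      rw [hdropk]
      have : arr.length / 2 - k = (arr.length / 2 - (k + 1)) + 1 := by omega
      rw [this, List.take_succ_cons, List.sum_cons]
    -- right slice: arr[mid:n-k] = arr[mid:n-k-1] ++ [arr[n-1-k]]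
    have hmidle : arr.length / 2 ≤ arr.length - 1 - k := by omega
    have htr : ((arr.take (arr.length - k)).drop (arr.length / 2)).sum
        = ((arr.take (arr.length - (k + 1))).drop (arr.length / 2)).sum + arr[arr.length - 1 - k] := by
      have he : arr.length - k = (arr.length - 1 - k) + 1 := by omega
      have h4 : arr.take ((arr.length - 1 - k) + 1)
          = arr.take (arr.length - 1 - k) ++ [arr[arr.length - 1 - k]] := by
        rw [List.take_add_one]
        simp [List.getElem?_eq_getElem hjn]
      have hlen : (arr.take (arr.length - 1 - k)).length = arr.length - 1 - k := by
        simp [Nat.min_eq_left (le_of_lt hjn)]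
      have he2 : arr.length - (k + 1) = arr.length - 1 - k := by omega
      rw [he, h4, List.drop_append_of_le_length (by omega), he2]
      simp
    rw [htl, htr, hcast3]
    simp only [PySem.List.pyGet?_natCast, List.getElem?_eq_getElem hkn,
      List.getElem?_eq_getElem hjn, Option.getD_some]
    ring_nf

theorem min_value_to_balance_eq (arr : List Int) :
    min_value_to_balance arr = min_value_to_balance_alt arr := by
  unfold min_value_to_balance min_value_to_balance_alt
  rw [pv_count_foldl]
  simp only [pv_sum_foldl, zero_add]
  have hmid : PySem.Int.floordiv (arr.length : Int) 2
      = ((arr.length / 2 : Nat) : Int) := by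
    exact_mod_cast PySem.Int.floordiv_natCast arr.length 2
  rw [hmid]
  simp only [PySem.List.slice_to_natCast, PySem.List.slice_from_natCast]
  have hgo := pvGoB_spec arr (arr.length / 2) 0 (by omega) (by omega) 0 0
  simp only [Nat.cast_zero, Nat.sub_zero, sub_zero, zero_add, List.drop_zero,
    List.take_length] at hgo
  rw [hgo]
  set L := (arr.take (arr.length / 2)).sum with hL
  set R := (arr.drop (arr.length / 2)).sum with hR
  by_cases h : R < L
  · rw [if_pos h, abs_of_nonneg (by omega)]
  · rw [if_neg (by omega), abs_of_nonpos (by omega)]; omega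

-- ===== VERDICT =====
theorem min_value_to_balance_spec : Claim_equal_min_value_to_balance := by
  intro arr _
  unfold Spec_min_value_to_balance
  exact min_value_to_balance_eq arr
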